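-- pv_equiv track=rewrite | github.com/todddeluca/reciprocal_smallest_distance | rsd/fasta.py | splitFastaOnNamelines
-- ===== SOURCE A (Python) =====
-- def splitFastaOnNamelines(filehandle):
--     '''
--     Split the lines in filehandle on namelines.  Yields a seq of lines, where
--     the first line in the seq is a nameline (except if filehandle starts with a
--     non-nameline) and the other lines are lines until the next nameline or the
--     end of the file.  Lines include newlines.  The seq of lines will always
--     contain at least one line.  Only the first line will ever be a nameline.
--
--     Example input (note that this is not well-formed fasta, since it starts
--     with a sequence line, has a nameline with no sequence lines, and has blank
--     lines within a sequence):
--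
--         VLSSIEQKSNEEGSEEKGPEVREYREKVETELQGVCDTVLGLLDSHLIKEAGDAESRVFY
--         >sp|P31947|1433S_HUMAN
--         >sp|P27348|1433T_HUMAN
--         MEKTELIQKAKLAEQAERYDDMATCMKAVTEQGAELSNEERNLLSVAYKNVVGGRRSAWR
--
--         EGAEN
--
--         >sp|P63104|1433Z_HUMAN
--
--         MDKNELVQKAKLAEQAERYDDMAACMKSVTEQGAELSNEERNLLSVAYKNVVGARRSSWR
--         MKGDYYRYLAEVAAGDDKKGIVDQSQQAYQEAFEISKKEMQPTHPIRLGLALNFSVFYYE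
--
--     Example yielded output (note how every sequence except the first starts
--     with a nameline):
--         yield ['VLSSIEQKSNEEGSEEKGPEVREYREKVETELQGVCDTVLGLLDSHLIKEAGDAESRVFY\n']
--         yield ['>sp|P31947|1433S_HUMAN\n']
--         yield ['>sp|P27348|1433T_HUMAN\n',
--         'MEKTELIQKAKLAEQAERYDDMATCMKAVTEQGAELSNEERNLLSVAYKNVVGGRRSAWR\n',
--         '\n',
--         'EGAEN\n',
--         '\n']
--         yield ['>sp|P63104|1433Z_HUMAN\n',
--         '\n',
--         'MDKNELVQKAKLAEQAERYDDMAACMKSVTEQGAELSNEERNLLSVAYKNVVGARRSSWR\n',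
--         'MKGDYYRYLAEVAAGDDKKGIVDQSQQAYQEAFEISKKEMQPTHPIRLGLALNFSVFYYE\n']
--
--     Well-formed example input (note how the first line of the input is a
--     nameline):
--
--         >sp|P27348|1433T_HUMAN
--         MEKTELIQKAKLAEQAERYDDMATCMKAVTEQGAELSNEERNLLSVAYKNVVGGRRSAWR
--         EGAEN
--         >sp|P63104|1433Z_HUMAN
--         MDKNELVQKAKLAEQAERYDDMAACMKSVTEQGAELSNEERNLLSVAYKNVVGARRSSWR
--         MKGDYYRYLAEVAAGDDKKGIVDQSQQAYQEAFEISKKEMQPTHPIRLGLALNFSVFYYE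
--
--     Well-formed example output (note how the first element of the first yielded
--     list is a nameline):
--
--         yield ['>sp|P27348|1433T_HUMAN\n',
--         'MEKTELIQKAKLAEQAERYDDMATCMKAVTEQGAELSNEERNLLSVAYKNVVGGRRSAWR\n',
--         'EGAEN\n']
--         yield ['>sp|P63104|1433Z_HUMAN\n',
--         'MDKNELVQKAKLAEQAERYDDMAACMKSVTEQGAELSNEERNLLSVAYKNVVGARRSSWR\n',
--         'MKGDYYRYLAEVAAGDDKKGIVDQSQQAYQEAFEISKKEMQPTHPIRLGLALNFSVFYYE\n']
--
--     '''
--     lines = []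
--     for line in filehandle:
--         if line and line[0] == '>': # a nameline
--             if lines:
--                 yield lines # yield current sequence
--             lines = [line] # start new sequence
--         else:
--             lines.append(line) # add to current sequence
--
--     if lines:
--         yield lines # yield current sequence
-- ===== SOURCE B (Python) =====
-- def _isNameline(line):
--     return bool(line) and line[0] == '>'
--
-- def splitFastaOnNamelines(filehandle):
--     # span-based: repeatedly take head + run of non-namelines as one group
--     lines = list(filehandle)
--     while lines:
--         j = 1
--         while j < len(lines) and not _isNameline(lines[j]):
--             j += 1
--         yield lines[:j]
--         lines = lines[j:]
-- ===== Notes on version B (the rewrite author's own statement) =====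
-- stated objective: simpler
-- what changed: Replaces A's accumulator loop with pending-group and end-of-loop flush by a span decomposition: repeatedly cut off the head line together with the following run of non-namelines and yield it.
import Mathlib
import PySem

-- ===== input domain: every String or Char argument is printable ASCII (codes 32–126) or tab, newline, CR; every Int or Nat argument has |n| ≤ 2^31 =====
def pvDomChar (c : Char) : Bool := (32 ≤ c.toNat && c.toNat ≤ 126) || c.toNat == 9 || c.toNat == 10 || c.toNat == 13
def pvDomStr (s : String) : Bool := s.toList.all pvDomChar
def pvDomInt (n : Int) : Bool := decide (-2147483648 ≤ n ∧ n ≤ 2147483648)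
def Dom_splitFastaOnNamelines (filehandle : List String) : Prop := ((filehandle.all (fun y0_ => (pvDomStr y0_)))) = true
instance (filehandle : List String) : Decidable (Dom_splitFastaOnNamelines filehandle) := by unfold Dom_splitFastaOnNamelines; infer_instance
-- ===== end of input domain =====

-- B changes the decomposition only (span cuts instead of accumulator + flush); return values identical.
-- A is a generator; the equivalence is about the sequence of yielded values (as a list).

-- ===== PORT A =====
-- `line and line[0] == '>'`
def pvIsNameline (line : String) : Bool :=
  match line.toList with
  | [] => false
  | c :: _ => c == '>'

-- the `for line in filehandle` loop with state (out = yielded so far, lines), then the final `if lines: yield lines`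
def pvLoopA (out : List (List String)) (lines : List String) : List String → List (List String)
  | [] => if lines.isEmpty then out else out ++ [lines]
  | line :: rest =>
    if pvIsNameline line then
      pvLoopA (if lines.isEmpty then out else out ++ [lines]) [line] rest
    else
      pvLoopA out (lines ++ [line]) rest

def splitFastaOnNamelines (filehandle : List String) : List (List String) :=
  pvLoopA [] [] filehandle

-- ===== PORT B =====
-- the inner `while` scans past the run of non-namelines after the head; lines[:j] / lines[j:] are that
-- take/drop split, ported as takeWhile/dropWhile on the tail
def splitFastaOnNamelines_alt (filehandle : List String) : List (List String) :=
  match filehandle with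
  | [] => []
  | l :: rest =>
    (l :: rest.takeWhile (fun x => !pvIsNameline x)) ::
      splitFastaOnNamelines_alt (rest.dropWhile (fun x => !pvIsNameline x))
termination_by filehandle.length
decreasing_by
  simp only [List.length_cons]
  exact Nat.lt_succ_of_le (List.length_dropWhile_le _ _)

-- ===== PRECONDITION & SPEC =====
def Spec_splitFastaOnNamelines (filehandle : List String) (out : List (List String)) : Prop := out = splitFastaOnNamelines_alt filehandle
instance (filehandle : List String) (out : List (List String)) : Decidable (Spec_splitFastaOnNamelines filehandle out) := by unfold Spec_splitFastaOnNamelines; infer_instance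

-- ===== CLAIM (what is proved, stated in full; the proofs are below) =====
def Claim_equal_splitFastaOnNamelines : Prop := ∀ (filehandle : List String), Dom_splitFastaOnNamelines filehandle → Spec_splitFastaOnNamelines filehandle (splitFastaOnNamelines filehandle)

-- ===== LEMMAS AND PROOFS =====

theorem pvAlt_cons (l : String) (rest : List String) :
    splitFastaOnNamelines_alt (l :: rest) =
      (l :: rest.takeWhile (fun x => !pvIsNameline x)) ::
        splitFastaOnNamelines_alt (rest.dropWhile (fun x => !pvIsNameline x)) := by
  rw [splitFastaOnNamelines_alt.eq_def]

-- loop invariant: with a nonempty pending group, A's loop yields that group extended by the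
-- current run of non-namelines, then behaves like B from the next nameline on
theorem pvLoopA_invariant (fh : List String) :
    ∀ (out : List (List String)) (cur : List String), cur ≠ [] →
    pvLoopA out cur fh =
      out ++ ((cur ++ fh.takeWhile (fun x => !pvIsNameline x)) ::
        splitFastaOnNamelines_alt (fh.dropWhile (fun x => !pvIsNameline x))) := by
  induction fh with
  | nil =>
    intro out cur hcur
    simp [pvLoopA, splitFastaOnNamelines_alt, List.isEmpty_iff, hcur]
  | cons l rest ih =>
    intro out cur hcur
    by_cases h : pvIsNameline l = true
    · have : pvLoopA out cur (l :: rest) =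
          pvLoopA (out ++ [cur]) [l] rest := by
        simp [pvLoopA, h, List.isEmpty_iff, hcur]
      rw [this, ih (out ++ [cur]) [l] (by simp)]
      simp [h, pvAlt_cons]
    · have hb : pvIsNameline l = false := by simpa using h
      have : pvLoopA out cur (l :: rest) = pvLoopA out (cur ++ [l]) rest := by
        simp [pvLoopA, hb]
      rw [this, ih out (cur ++ [l]) (by simp)]
      simp [hb]

theorem pvEquiv (fh : List String) :
    splitFastaOnNamelines fh = splitFastaOnNamelines_alt fh := by
  cases fh with
  | nil => simp [splitFastaOnNamelines, pvLoopA, splitFastaOnNamelines_alt]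
  | cons l rest =>
    have h1 : splitFastaOnNamelines (l :: rest) = pvLoopA [] [l] rest := by
      by_cases h : pvIsNameline l = true
      · simp [splitFastaOnNamelines, pvLoopA, h]
      · have hb : pvIsNameline l = false := by simpa using h
        simp [splitFastaOnNamelines, pvLoopA, hb]
    rw [h1, pvLoopA_invariant rest [] [l] (by simp), pvAlt_cons]
    simp

-- ===== VERDICT (by name: the statement is the Claim_ definition above) =====
theorem splitFastaOnNamelines_spec : Claim_equal_splitFastaOnNamelines := by
  intro fh _
  unfold Spec_splitFastaOnNamelines
  exact pvEquiv fh
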